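-- pv_equiv track=rewrite | github.com/Rohitrk11062004/Skill-Intelligence | backend/Skill_extraction/json_to_excel.py | group_skills_by_category
-- ===== SOURCE A (Python) =====
-- from typing import Dict, List
--
-- CATEGORY_ORDER = [
--     "Technical Skills",
--     "Domain/Tools/Process",
--     "Team Management",
--     "People Management Skills",
--     "Communication Skills",
--     "Behavioral Skills",
-- ]
--
-- def group_skills_by_category(skills: List[Dict]) -> Dict[str, List[str]]:
--     grouped = {cat: [] for cat in CATEGORY_ORDER}
--     for s in skills or []:
--         cat = (s.get("category") or "").strip()
--         name = (s.get("name") or "").strip()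
--         if not name:
--             continue
--         if cat not in grouped:
--             grouped.setdefault(cat, [])
--         grouped[cat].append(name)
--
--     # Deduplicate while preserving order
--     for cat, items in grouped.items():
--         seen = set()
--         deduped = []
--         for item in items:
--             k = item.lower()
--             if k not in seen:
--                 seen.add(k)
--                 deduped.append(item)
--         grouped[cat] = deduped
--     return grouped
-- ===== SOURCE B (Python) =====
-- from typing import Dict, List
--
-- CATEGORY_ORDER = [
--     "Technical Skills",
--     "Domain/Tools/Process",
--     "Team Management",
--     "People Management Skills",
--     "Communication Skills",
--     "Behavioral Skills",
-- ]
--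
-- def group_skills_by_category(skills: List[Dict]) -> Dict[str, List[str]]:
--     # Single fused pass: group and dedup together, keeping a per-category
--     # set of lowercased names already emitted.
--     grouped = {cat: [] for cat in CATEGORY_ORDER}
--     seen = {cat: set() for cat in CATEGORY_ORDER}
--     for s in skills or []:
--         name = (s.get("name") or "").strip()
--         if not name:
--             continue
--         cat = (s.get("category") or "").strip()
--         bucket = grouped.setdefault(cat, [])
--         keys = seen.setdefault(cat, set())
--         k = name.lower()
--         if k not in keys:
--             keys.add(k)
--             bucket.append(name)
--     return grouped
-- ===== Notes on version B (the rewrite author's own statement) =====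
-- stated objective: alternative
-- what changed: B fuses A's two phases (group everything, then rebuild each bucket deduplicating) into a single pass over the skills that maintains a per-category seen-set of lowercased names and appends a name only when its lowercase key is new.
import Mathlib
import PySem

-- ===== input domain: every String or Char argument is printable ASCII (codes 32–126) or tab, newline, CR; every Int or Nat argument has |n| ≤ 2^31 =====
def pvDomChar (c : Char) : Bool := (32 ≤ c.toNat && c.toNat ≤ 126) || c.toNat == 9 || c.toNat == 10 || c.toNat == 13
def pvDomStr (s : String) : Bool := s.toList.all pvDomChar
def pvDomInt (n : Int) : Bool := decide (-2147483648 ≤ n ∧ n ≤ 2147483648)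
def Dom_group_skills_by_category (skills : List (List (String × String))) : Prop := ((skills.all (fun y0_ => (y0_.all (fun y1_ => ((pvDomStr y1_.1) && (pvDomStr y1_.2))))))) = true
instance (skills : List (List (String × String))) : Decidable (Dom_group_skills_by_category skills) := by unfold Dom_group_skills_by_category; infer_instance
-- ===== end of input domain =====

-- B fuses A's group-then-dedup two-phase construction into one pass that keeps a per-category
-- seen-set of lowercased names; same return value, alternative decomposition.

def catOrder : List String :=
  ["Technical Skills", "Domain/Tools/Process", "Team Management",
   "People Management Skills", "Communication Skills", "Behavioral Skills"]

-- (s.get(k) or "").strip() for a skill dict s (assoc list, first match)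
def getField (s : List (String × String)) (k : String) : String :=
  PySem.Str.strip (((PySem.Dict.mk s).get? k).getD "")

-- ===== PORT A =====
-- first loop of A: group all (nonempty-name) skills under their category
def aStep (d : PySem.Dict String (List String)) (s : List (String × String)) :
    PySem.Dict String (List String) :=
  let cat := getField s "category"
  let name := getField s "name"
  if name = "" then d
  else
    let d := if d.contains cat then d else d.setdefault cat []
    d.insert cat (d.getD cat [] ++ [name])

-- inner dedup loop of A's second pass (seen : set, deduped : list)
def aDedup (items : List String) : List String :=
  (items.foldl
      (fun (st : PySem.Set String × List String) item =>
        let k := PySem.Str.lower item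
        if st.1.contains k then st else (PySem.Set.add st.1 k, st.2 ++ [item]))
      (PySem.Set.empty, [])).2

def group_skills_by_category (skills : List (List (String × String))) :
    List (String × List String) :=
  let grouped := catOrder.foldl (fun d c => d.insert c []) PySem.Dict.empty
  let grouped := skills.foldl aStep grouped
  let grouped := grouped.items.foldl (fun d p => d.insert p.1 (aDedup p.2)) grouped
  grouped.items

-- ===== PORT B =====
-- single fused pass: (grouped, seen) where seen maps a category to the set of lowercased names kept
def bStep (st : PySem.Dict String (List String) × PySem.Dict String (PySem.Set String))
    (s : List (String × String)) :
    PySem.Dict String (List String) × PySem.Dict String (PySem.Set String) :=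
  let name := getField s "name"
  if name = "" then st
  else
    let cat := getField s "category"
    let g := st.1.setdefault cat []
    let sn := st.2.setdefault cat PySem.Set.empty
    let keysv := sn.getD cat PySem.Set.empty
    let k := PySem.Str.lower name
    if keysv.contains k then (g, sn)
    else (g.insert cat (g.getD cat [] ++ [name]), sn.insert cat (keysv.add k))

def group_skills_by_category_alt (skills : List (List (String × String))) :
    List (String × List String) :=
  let grouped := catOrder.foldl (fun d c => d.insert c []) PySem.Dict.empty
  let seen := catOrder.foldl (fun d c => d.insert c PySem.Set.empty) PySem.Dict.empty
  let st := skills.foldl bStep (grouped, seen)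
  st.1.items

-- ===== PRECONDITION & SPEC =====
def Spec_group_skills_by_category (skills : List (List (String × String))) (out : List (String × List String)) : Prop := out = group_skills_by_category_alt skills
instance (skills : List (List (String × String))) (out : List (String × List String)) : Decidable (Spec_group_skills_by_category skills out) := by unfold Spec_group_skills_by_category; infer_instance

-- ===== CLAIM (what is proved, stated in full; the proofs are below) =====
def Claim_equal_group_skills_by_category : Prop := ∀ (skills : List (List (String × String))), Dom_group_skills_by_category skills → Spec_group_skills_by_category skills (group_skills_by_category skills)

-- ===== LEMMAS AND PROOFS =====

-- dedup-with-seen, recursively (specification-side view of A's dedup fold)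
def ddp (seen : PySem.Set String) : List String → List String
  | [] => []
  | x :: t =>
    if seen.contains (PySem.Str.lower x) then ddp seen t
    else x :: ddp (seen.add (PySem.Str.lower x)) t

theorem ddA_loop (l : List String) (s : PySem.Set String) (acc : List String) :
    l.foldl
      (fun (st : PySem.Set String × List String) item =>
        let k := PySem.Str.lower item
        if st.1.contains k then st else (PySem.Set.add st.1 k, st.2 ++ [item]))
      (s, acc)
    = (PySem.Set.update s (l.map PySem.Str.lower), acc ++ ddp s l) := by
  induction l generalizing s acc with
  | nil => simp [ddp, PySem.Set.update]
  | cons x t ih =>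
    simp only [List.foldl_cons, List.map_cons, ddp]
    by_cases h : s.contains (PySem.Str.lower x)
    · simp only [h, if_true, ih]
      have : PySem.Set.add s (PySem.Str.lower x) = s := by
        simp only [PySem.Set.add, h, if_true]
      simp [PySem.Set.update, this]
    · simp only [h, if_false, ih, Bool.false_eq_true]
      simp [PySem.Set.update]

theorem aDedup_eq (l : List String) : aDedup l = ddp PySem.Set.empty l := by
  unfold aDedup
  rw [ddA_loop]
  simp

theorem ddp_append (l : List String) (x : String) (s : PySem.Set String) :
    ddp s (l ++ [x]) =
      ddp s l ++
        (if (PySem.Set.update s (l.map PySem.Str.lower)).contains (PySem.Str.lower x)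
         then [] else [x]) := by
  induction l generalizing s with
  | nil => by_cases h : s.contains (PySem.Str.lower x) <;> simp [ddp, PySem.Set.update, h]
  | cons y t ih =>
    simp only [List.cons_append, ddp, List.map_cons]
    by_cases h : s.contains (PySem.Str.lower y)
    · have hadd : PySem.Set.add s (PySem.Str.lower y) = s := by
        simp only [PySem.Set.add, h, if_true]
      simp [h, ih, PySem.Set.update, hadd]
      split_ifs <;> simp
    · have h' : PySem.Str.lower y ∉ s := by simpa [PySem.Set.contains] using h
      simp [h, ih, PySem.Set.update]
      split_ifs <;> simp_all

theorem set_update_self (s : PySem.Set String) (l : List String) (h : ∀ x ∈ l, x ∈ s) :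
    PySem.Set.update s l = s := by
  induction l generalizing s with
  | nil => rfl
  | cons x t ih =>
    have hx : s.contains x = true := by
      simp [PySem.Set.contains, List.contains_iff_mem]; exact h x (by simp)
    have hstep : PySem.Set.update s (x :: t) = PySem.Set.update (s.add x) t := rfl
    rw [hstep]
    have ha : PySem.Set.add s x = s := by simp only [PySem.Set.add, hx, if_true]
    rw [ha]; exact ih s (fun y hy => h y (by simp [hy]))

theorem getD_setdefault_self {ν : Type} (d : PySem.Dict String ν) (k : String) (v : ν) :
    (d.setdefault k v).getD k v = d.getD k v := by
  by_cases h : d.contains k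
  · rw [PySem.Dict.setdefault_of_contains _ _ h]
  · rw [PySem.Dict.setdefault_of_not_contains _ _ (by simpa using h)]
    rw [PySem.Dict.getD_insert_self, PySem.Dict.getD_of_not_contains _ _ (by simpa using h)]

theorem getD_setdefault_of_ne {ν : Type} (d : PySem.Dict String ν) (k c : String) (v w : ν)
    (hne : c ≠ k) : (d.setdefault k v).getD c w = d.getD c w := by
  by_cases h : d.contains k
  · rw [PySem.Dict.setdefault_of_contains _ _ h]
  · rw [PySem.Dict.setdefault_of_not_contains _ _ (by simpa using h)]
    rw [PySem.Dict.getD_insert_of_ne _ _ _ hne]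

theorem contains_setdefault_self {ν : Type} (d : PySem.Dict String ν) (k : String) (v : ν) :
    (d.setdefault k v).contains k = true := by
  by_cases h : d.contains k
  · rw [PySem.Dict.setdefault_of_contains _ _ h]; exact h
  · rw [PySem.Dict.setdefault_of_not_contains _ _ (by simpa using h)]
    exact PySem.Dict.contains_insert_self _ _ _

theorem keys_setdefault {ν : Type} (d : PySem.Dict String ν) (k : String) (v : ν) :
    (d.setdefault k v).keys = if d.contains k then d.keys else d.keys ++ [k] := by
  by_cases h : d.contains k
  · rw [PySem.Dict.setdefault_of_contains _ _ h]; simp [h]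
  · rw [PySem.Dict.setdefault_of_not_contains _ _ (by simpa using h)]
    simp [h, PySem.Dict.keys_insert_of_not_contains _ _ (by simpa using h)]

theorem foldl_insert_items_getD (l : List (String × List String))
    (F : List String → List String) (hnd : (l.map (fun p => p.1)).Nodup)
    (d : PySem.Dict String (List String)) (c : String) :
    (l.foldl (fun d p => d.insert p.1 (F p.2)) d).getD c [] =
      (match l.find? (fun p => p.1 == c) with
       | some p => F p.2
       | none => d.getD c []) := by
  induction l generalizing d with
  | nil => simp
  | cons p t ih =>
    simp only [List.foldl_cons, List.map_cons] at *
    by_cases hc : p.1 = c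
    · have hfind : (p :: t).find? (fun q => q.1 == c) = some p := by
        simp [List.find?_cons, hc]
      rw [hfind]
      have hnone : t.find? (fun q => q.1 == c) = none := by
        apply List.find?_eq_none.mpr
        intro q hq
        have hmem : q.1 ∈ t.map (fun p => p.1) := List.mem_map_of_mem hq
        subst hc
        simp only [beq_iff_eq]
        intro hqc
        exact (List.nodup_cons.mp hnd).1 (hqc ▸ hmem)
      rw [ih (List.nodup_cons.mp hnd).2, hnone]
      subst hc
      simp [PySem.Dict.getD_insert_self]
    · have hfind : (p :: t).find? (fun q => q.1 == c) = t.find? (fun q => q.1 == c) := by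
        simp [List.find?_cons, hc]
      rw [hfind, ih (List.nodup_cons.mp hnd).2]
      cases t.find? (fun q => q.1 == c) with
      | some q => rfl
      | none => simp [PySem.Dict.getD_insert_of_ne _ _ _ (Ne.symm hc)]

-- the invariant between A's first-pass state and B's fused state
def GInv (ga g : PySem.Dict String (List String)) (sn : PySem.Dict String (PySem.Set String)) : Prop :=
  ga.keys.Nodup ∧ g.keys = ga.keys ∧
  (∀ c, g.getD c [] = ddp PySem.Set.empty (ga.getD c [])) ∧
  (∀ c, sn.getD c PySem.Set.empty
        = PySem.Set.ofList ((ga.getD c []).map PySem.Str.lower))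

theorem step_inv (s : List (String × String)) (ga g : PySem.Dict String (List String))
    (sn : PySem.Dict String (PySem.Set String)) (h : GInv ga g sn) :
    GInv (aStep ga s) (bStep (g, sn) s).1 (bStep (g, sn) s).2 := by
  obtain ⟨hnd, hkeys, hg, hsn⟩ := h
  by_cases hname : getField s "name" = ""
  · simpa [aStep, bStep, hname] using ⟨hnd, hkeys, hg, hsn⟩
  · have hA : aStep ga s =
        (ga.setdefault (getField s "category") []).insert (getField s "category")
          ((ga.setdefault (getField s "category") []).getD (getField s "category") []
            ++ [getField s "name"]) := by
      simp only [aStep, hname, if_false]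
      by_cases hc : ga.contains (getField s "category")
      · rw [if_pos hc, PySem.Dict.setdefault_of_contains _ _ hc]
      · rw [if_neg hc]
    have hB : bStep (g, sn) s =
        (if ((sn.setdefault (getField s "category") PySem.Set.empty).getD
              (getField s "category") PySem.Set.empty).contains
              (PySem.Str.lower (getField s "name"))
         then (g.setdefault (getField s "category") [],
               sn.setdefault (getField s "category") PySem.Set.empty)
         else ((g.setdefault (getField s "category") []).insert (getField s "category")
                 ((g.setdefault (getField s "category") []).getD (getField s "category") []
                   ++ [getField s "name"]),
               (sn.setdefault (getField s "category") PySem.Set.empty).insert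
                 (getField s "category")
                 (((sn.setdefault (getField s "category") PySem.Set.empty).getD
                     (getField s "category") PySem.Set.empty).add
                   (PySem.Str.lower (getField s "name"))))) := by
      simp only [bStep, hname, if_false]
    set cat := getField s "category" with hcatdef
    set name := getField s "name" with hnamedef
    set L := ga.getD cat [] with hL
    have hga1 : (ga.setdefault cat []).getD cat [] = L := getD_setdefault_self ga cat []
    have hA1 : (aStep ga s).getD cat [] = L ++ [name] := by
      rw [hA, PySem.Dict.getD_insert_self, hga1]
    have hA2 : ∀ c, c ≠ cat → (aStep ga s).getD c [] = ga.getD c [] := by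
      intro c hc
      rw [hA, PySem.Dict.getD_insert_of_ne _ _ _ hc, getD_setdefault_of_ne _ _ _ _ _ hc]
    have hAk : (aStep ga s).keys = if ga.contains cat then ga.keys else ga.keys ++ [cat] := by
      rw [hA, PySem.Dict.keys_insert_of_contains _ _ (contains_setdefault_self _ _ _),
        keys_setdefault]
    have hAnd : (aStep ga s).keys.Nodup := by
      rw [hAk]
      by_cases hc : ga.contains cat
      · simpa [hc] using hnd
      · have hnm : cat ∉ ga.keys := by
          intro hm
          exact hc ((PySem.Dict.contains_iff_mem_keys ga cat).mpr hm)
        have hap : (ga.keys ++ [cat]).Nodup := by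
          simp [List.nodup_append, hnd]
          exact fun a ha hac => hnm (hac ▸ ha)
        simpa [hc] using hap
    have hceq : g.contains cat = ga.contains cat := by
      by_cases hc : ga.contains cat
      · have : cat ∈ g.keys := hkeys ▸ (PySem.Dict.contains_iff_mem_keys ga cat).mp hc
        rw [hc, (PySem.Dict.contains_iff_mem_keys g cat).mpr this]
      · have hm : cat ∉ ga.keys := fun hm => hc ((PySem.Dict.contains_iff_mem_keys ga cat).mpr hm)
        have hgc : ¬ g.contains cat = true := by
          intro hgc
          exact hm (hkeys ▸ (PySem.Dict.contains_iff_mem_keys g cat).mp hgc)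
        simp only [Bool.not_eq_true] at *
        rw [hgc, hc]
    have hsv : (sn.setdefault cat PySem.Set.empty).getD cat PySem.Set.empty
        = PySem.Set.ofList (L.map PySem.Str.lower) := by
      rw [getD_setdefault_self, hsn cat]
    rw [hsv] at hB
    have hupd : PySem.Set.update PySem.Set.empty (L.map PySem.Str.lower)
        = PySem.Set.ofList (L.map PySem.Str.lower) := rfl
    have hgk1 : (g.setdefault cat []).keys
        = if ga.contains cat then ga.keys else ga.keys ++ [cat] := by
      rw [keys_setdefault, hceq, hkeys]
    have hofl : List.foldl PySem.Set.add PySem.Set.empty (L.map PySem.Str.lower)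
        = PySem.Set.ofList (L.map PySem.Str.lower) := rfl
    by_cases hcond :
        (PySem.Set.ofList (L.map PySem.Str.lower)).contains (PySem.Str.lower name) = true
    · -- duplicate name: B appends nothing, dedup of A's longer bucket is unchanged
      rw [if_pos hcond] at hB
      refine ⟨hAnd, ?_, ?_, ?_⟩
      · rw [hB, hAk]
        exact hgk1
      · intro c
        rw [hB]
        by_cases hc : c = cat
        · subst hc
          rw [getD_setdefault_self, hA1, ddp_append, hupd, hg cat, ← hL, if_pos hcond]
          simp
        · rw [getD_setdefault_of_ne _ _ _ _ _ hc, hA2 c hc, hg c]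
      · intro c
        rw [hB]
        by_cases hc : c = cat
        · subst hc
          rw [getD_setdefault_self, hA1, hsn cat, ← hL]
          have hid : PySem.Set.add (PySem.Set.ofList (L.map PySem.Str.lower))
              (PySem.Str.lower name) = PySem.Set.ofList (L.map PySem.Str.lower) := by
            simp only [PySem.Set.add, hcond, if_true]
          simp only [List.map_append, List.map_cons, List.map_nil, PySem.Set.ofList,
            List.foldl_append, List.foldl_cons, List.foldl_nil]
          rw [hofl, hid]
        · rw [getD_setdefault_of_ne _ _ _ _ _ hc, hA2 c hc, hsn c]
    · -- new name: both sides append it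
      rw [if_neg hcond] at hB
      refine ⟨hAnd, ?_, ?_, ?_⟩
      · rw [hB, hAk]
        rw [PySem.Dict.keys_insert_of_contains _ _ (contains_setdefault_self _ _ _)]
        exact hgk1
      · intro c
        rw [hB]
        by_cases hc : c = cat
        · subst hc
          rw [PySem.Dict.getD_insert_self, getD_setdefault_self, hA1, ddp_append, hupd,
            hg cat, ← hL, if_neg hcond]
        · rw [PySem.Dict.getD_insert_of_ne _ _ _ hc, getD_setdefault_of_ne _ _ _ _ _ hc,
            hA2 c hc, hg c]
      · intro c
        rw [hB]
        by_cases hc : c = cat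
        · subst hc
          rw [PySem.Dict.getD_insert_self, hA1]
          simp only [List.map_append, List.map_cons, List.map_nil, PySem.Set.ofList,
            List.foldl_append, List.foldl_cons, List.foldl_nil]
        · rw [PySem.Dict.getD_insert_of_ne _ _ _ hc, getD_setdefault_of_ne _ _ _ _ _ hc,
            hA2 c hc, hsn c]

theorem loop_inv (skills : List (List (String × String)))
    (ga g : PySem.Dict String (List String)) (sn : PySem.Dict String (PySem.Set String))
    (h : GInv ga g sn) :
    GInv (skills.foldl aStep ga) (skills.foldl bStep (g, sn)).1 (skills.foldl bStep (g, sn)).2 := by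
  induction skills generalizing ga g sn with
  | nil => exact h
  | cons s t ih =>
    simp only [List.foldl_cons]
    have := step_inv s ga g sn h
    have hpair : bStep (g, sn) s = ((bStep (g, sn) s).1, (bStep (g, sn) s).2) := rfl
    rw [hpair]
    exact ih _ _ _ this

theorem init_inv :
    GInv (catOrder.foldl (fun d c => d.insert c []) PySem.Dict.empty)
        (catOrder.foldl (fun d c => d.insert c []) PySem.Dict.empty)
        (catOrder.foldl (fun d c => d.insert c PySem.Set.empty) PySem.Dict.empty) := by
  have hg0 : ∀ c : String,
      (catOrder.foldl (fun d c => d.insert c []) PySem.Dict.empty).getD c ([] : List String)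
        = [] := by
    intro c
    simp only [catOrder, List.foldl_cons, List.foldl_nil]
    simp [PySem.Dict.getD_insert]
  have hs0 : ∀ c : String,
      (catOrder.foldl (fun d c => d.insert c (PySem.Set.empty : PySem.Set String)) PySem.Dict.empty).getD c
          (PySem.Set.empty : PySem.Set String) = PySem.Set.empty := by
    intro c
    simp only [catOrder, List.foldl_cons, List.foldl_nil]
    simp [PySem.Dict.getD_insert]
  refine ⟨by decide, rfl, ?_, ?_⟩
  · intro c; rw [hg0 c]; rfl
  · intro c; rw [hs0 c, hg0 c]; rfl

-- ===== VERDICT (by name: the statement is the Claim_ definition above) =====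
theorem group_skills_by_category_spec : Claim_equal_group_skills_by_category := by
  intro skills _
  unfold Spec_group_skills_by_category
  simp only [group_skills_by_category, group_skills_by_category_alt]
  obtain ⟨hnd, hkeys, hg, hsn⟩ :=
    loop_inv skills _ _ _ init_inv
  set ga := skills.foldl aStep (catOrder.foldl (fun d c => d.insert c []) PySem.Dict.empty)
    with hga
  set stb := skills.foldl bStep
    (catOrder.foldl (fun d c => d.insert c []) PySem.Dict.empty,
     catOrder.foldl (fun d c => d.insert c PySem.Set.empty) PySem.Dict.empty) with hstb
  set gfin := ga.items.foldl (fun d p => d.insert p.1 (aDedup p.2)) ga with hgfin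
  have hndit : (ga.items.map (fun p => p.1)).Nodup := hnd
  have hk2 : gfin.keys = ga.keys := by
    rw [hgfin]
    have hkf := PySem.Dict.keys_foldl_insert_key (ν := List String) ga.items
      (fun p => p.1) (fun _ p => aDedup p.2) ga
    rw [show (fun (d : PySem.Dict String (List String)) (x : String × List String) =>
        d.insert x.1 (aDedup x.2))
      = (fun (d : PySem.Dict String (List String)) (x : String × List String) =>
        d.insert ((fun p => p.1) x) ((fun (_ : PySem.Dict String (List String)) p => aDedup p.2) d x))
      from rfl]
    rw [hkf]
    exact set_update_self _ _ (fun x hx => hx)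
  have hgfinD : ∀ c, gfin.getD c [] = ddp PySem.Set.empty (ga.getD c []) := by
    intro c
    rw [hgfin, foldl_insert_items_getD _ _ hndit]
    cases hf : ga.items.find? (fun p => p.1 == c) with
    | none =>
      have hge : ga.getD c [] = [] := by
        rw [PySem.Dict.getD_eq_get?_getD]
        simp [PySem.Dict.get?, hf]
      simp only [hge, ddp]
    | some p =>
      have hge : ga.getD c [] = p.2 := by
        rw [PySem.Dict.getD_eq_get?_getD]
        simp [PySem.Dict.get?, hf]
      simp only [hge]
      exact aDedup_eq p.2
  have hndfin : gfin.keys.Nodup := hk2 ▸ hnd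
  have hndb : stb.1.keys.Nodup := hkeys ▸ hnd
  rw [PySem.Dict.items_eq_map_keys gfin hndfin [], PySem.Dict.items_eq_map_keys stb.1 hndb []]
  rw [hk2, hkeys]
  apply List.map_congr_left
  intro k _
  rw [hgfinD k, hg k]
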